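-- pv_equiv track=rewrite | github.com/gautamgauri/Diksha-Fundraising-Bot- | email_generator.py | _summarize_profile_content
-- ===== SOURCE A (Python) =====
-- def _summarize_profile_content(content: str) -> str:
--     """Create a summary of profile content for Claude context"""
--     if not content or len(content) < 50:
--         return "No detailed profile content available"
--
--     # Create a smart summary (first 200 chars + key points)
--     summary = content[:200] + "...\n\n"
--
--     # Extract key information patterns
--     key_patterns = [
--         'mission', 'vision', 'values', 'focus', 'priorities',
--         'programs', 'initiatives', 'partnerships', 'impact',
--         'geographic', 'sector', 'target', 'beneficiaries'
--     ]
--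
--     found_key_points = []
--     content_lower = content.lower()
--
--     for pattern in key_patterns:
--         if pattern in content_lower:
--             # Find the sentence containing this pattern
--             sentences = content.split('.')
--             for sentence in sentences:
--                 if pattern in sentence.lower() and len(sentence.strip()) > 20:
--                     found_key_points.append(sentence.strip())
--                     break
--
--     if found_key_points:
--         summary += "Key Profile Points:\n"
--         for point in found_key_points[:5]:  # Limit to 5 key points
--             summary += f"• {point}\n"
--
--     return summary
-- ===== SOURCE B (Python) =====
-- def _summarize_profile_content(content: str) -> str:
--     """Create a summary of profile content for Claude context"""
--     if not content or len(content) < 50: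
--         return "No detailed profile content available"
--
--     summary = content[:200] + "...\n\n"
--
--     key_patterns = [
--         'mission', 'vision', 'values', 'focus', 'priorities',
--         'programs', 'initiatives', 'partnerships', 'impact',
--         'geographic', 'sector', 'target', 'beneficiaries'
--     ]
--
--     # One pass over the sentences: record, for each pattern, the first
--     # document-order sentence (stripped, length > 20) that contains it.
--     first_match = {}
--     for sentence in content.split('.'):
--         stripped = sentence.strip()
--         if len(stripped) > 20:
--             low = sentence.lower()
--             for pattern in key_patterns:
--                 if pattern in low and pattern not in first_match:
--                     first_match[pattern] = stripped
--
--     found_key_points = [first_match[p] for p in key_patterns if p in first_match]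
--
--     if found_key_points:
--         summary += "Key Profile Points:\n"
--         for point in found_key_points[:5]:
--             summary += f"• {point}\n"
--
--     return summary
-- ===== Notes on version B (the rewrite author's own statement) =====
-- stated objective: alternative
-- what changed: A re-splits the content and rescans the whole sentence list once per pattern (plus a redundant substring pre-check on the lowered content); B splits once and makes a single pass over the sentences, recording in a dict the first qualifying sentence per pattern, then reads the dict back in pattern order.
import Mathlib
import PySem

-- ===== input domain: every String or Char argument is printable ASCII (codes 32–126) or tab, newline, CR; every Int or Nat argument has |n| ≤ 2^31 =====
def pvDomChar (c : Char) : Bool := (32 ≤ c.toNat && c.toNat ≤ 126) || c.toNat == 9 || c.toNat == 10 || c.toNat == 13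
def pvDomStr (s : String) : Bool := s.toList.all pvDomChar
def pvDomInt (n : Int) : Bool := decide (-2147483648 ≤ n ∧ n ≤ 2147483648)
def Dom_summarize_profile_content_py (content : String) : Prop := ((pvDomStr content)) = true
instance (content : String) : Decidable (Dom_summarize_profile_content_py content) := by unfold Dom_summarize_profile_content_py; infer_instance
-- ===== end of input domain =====

-- B replaces A's per-pattern rescan of the sentence list (split once per pattern, inner scan per
-- pattern) by a single pass over the sentences that records in a dict the first qualifying
-- sentence for each pattern, then reads the dict back in pattern order (objective: alternative).

-- the fixed pattern list both programs carry as a literal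
def pvKeyPatterns : List String :=
  ["mission", "vision", "values", "focus", "priorities",
   "programs", "initiatives", "partnerships", "impact",
   "geographic", "sector", "target", "beneficiaries"]

-- ===== PORT A =====
def summarize_profile_content_py (content : String) : String :=
  if content == "" || PySem.Str.len content < 50 then
    "No detailed profile content available"
  else
    let summary := PySem.Str.slice content none (some 200) ++ "...\n\n"
    let content_lower := PySem.Str.lower content
    let found_key_points := pvKeyPatterns.foldl (fun acc pattern =>
      if PySem.Str.isIn pattern content_lower then
        let sentences := (PySem.Str.split? content ".").getD []
        -- inner 'for sentence in sentences: … break' = first match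
        match sentences.find? (fun sentence =>
            PySem.Str.isIn pattern (PySem.Str.lower sentence) &&
              20 < PySem.Str.len (PySem.Str.strip sentence)) with
        | some sentence => acc ++ [PySem.Str.strip sentence]
        | none => acc
      else acc) []
    if found_key_points != [] then
      (PySem.List.slice found_key_points none (some 5)).foldl
        (fun s point => s ++ ("• " ++ point ++ "\n"))
        (summary ++ "Key Profile Points:\n")
    else summary

-- ===== PORT B =====
def summarize_profile_content_py_alt (content : String) : String :=
  if content == "" || PySem.Str.len content < 50 then
    "No detailed profile content available"
  else
    let summary := PySem.Str.slice content none (some 200) ++ "...\n\n"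
    let first_match := ((PySem.Str.split? content ".").getD []).foldl
      (fun (d : PySem.Dict String String) sentence =>
        let stripped := PySem.Str.strip sentence
        if 20 < PySem.Str.len stripped then
          let low := PySem.Str.lower sentence
          pvKeyPatterns.foldl (fun d pattern =>
            if PySem.Str.isIn pattern low && (d.get? pattern).isNone then
              d.insert pattern stripped
            else d) d
        else d) PySem.Dict.empty
    -- [first_match[p] for p in key_patterns if p in first_match]
    let found_key_points := pvKeyPatterns.filterMap (fun p => first_match.get? p)
    if found_key_points != [] then
      (PySem.List.slice found_key_points none (some 5)).foldl
        (fun s point => s ++ ("• " ++ point ++ "\n"))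
        (summary ++ "Key Profile Points:\n")
    else summary

-- ===== PRECONDITION & SPEC =====
def Spec_summarize_profile_content_py (content : String) (out : String) : Prop := out = summarize_profile_content_py_alt content
instance (content : String) (out : String) : Decidable (Spec_summarize_profile_content_py content out) := by unfold Spec_summarize_profile_content_py; infer_instance

-- ===== CLAIM (what is proved, stated in full; the proofs are below) =====
def Claim_equal_summarize_profile_content_py : Prop := ∀ (content : String), Dom_summarize_profile_content_py content → Spec_summarize_profile_content_py content (summarize_profile_content_py content)

-- ===== LEMMAS AND PROOFS =====

-- the per-sentence qualification test both programs use for a pattern p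
def pvPred (p sentence : String) : Bool :=
  PySem.Str.isIn p (PySem.Str.lower sentence) &&
    20 < PySem.Str.len (PySem.Str.strip sentence)

-- every chunk produced by splitOn.go is an old accumulator entry or an infix of cur.reverse ++ l
lemma pv_go_infix (sep : List Char) :
    ∀ (fuel : Nat) (l cur : List Char) (acc : List (List Char)) (x : List Char),
      x ∈ PySem.Chars.splitOn.go sep fuel l cur acc → x ∈ acc ∨ x <:+: (cur.reverse ++ l) := by
  intro fuel
  induction fuel with
  | zero =>
    intro l cur acc x hx
    rw [PySem.Chars.splitOn.go] at hx
    simp only [List.mem_reverse, List.mem_cons] at hx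
    rcases hx with hx | hx
    · exact Or.inr (hx ▸ List.infix_refl _)
    · exact Or.inl hx
  | succ fuel ih =>
    intro l cur acc x hx
    match l with
    | [] =>
      rw [PySem.Chars.splitOn.go] at hx
      simp only [List.mem_reverse, List.mem_cons] at hx
      rcases hx with hx | hx
      · exact Or.inr (hx ▸ (List.prefix_append _ _).isInfix)
      · exact Or.inl hx
      all_goals omega
    | c :: rest =>
      rw [PySem.Chars.splitOn.go] at hx
      by_cases hpre : sep.isPrefixOf (c :: rest) = true
      · rw [if_pos hpre] at hx
        rcases ih _ _ _ _ hx with hx | hx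
        · rcases List.mem_cons.mp hx with hx | hx
          · exact Or.inr (hx ▸ (List.prefix_append _ _).isInfix)
          · exact Or.inl hx
        · refine Or.inr (hx.trans ?_)
          simp only [List.reverse_nil, List.nil_append]
          exact ((List.drop_suffix _ _).trans (List.suffix_append _ _)).isInfix
      · rw [if_neg hpre] at hx
        rcases ih _ _ _ _ hx with hx | hx
        · exact Or.inl hx
        · refine Or.inr ?_
          rw [List.reverse_cons, List.append_assoc] at hx
          exact hx

-- a piece of content.split('.') is an infix of content
lemma pv_mem_split_infix (content s : String)
    (hs : s ∈ (PySem.Str.split? content ".").getD []) : s.toList <:+: content.toList := by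
  simp only [PySem.Str.split?, PySem.Chars.split?] at hs
  have hsep : (".".toList.isEmpty) = false := by decide
  rw [hsep] at hs
  simp only [Bool.false_eq_true, if_false, Option.map_some, Option.getD_some, List.mem_map] at hs
  obtain ⟨cs, hcs, rfl⟩ := hs
  rw [PySem.Chars.splitOn] at hcs
  have := pv_go_infix _ _ _ _ _ _ hcs
  simp only [List.not_mem_nil, false_or, List.reverse_nil, List.nil_append] at this
  simpa using this

-- if a pattern occurs in a sentence of the split, it occurs in the lowered content
lemma pv_isIn_content (content p s : String)
    (hs : s ∈ (PySem.Str.split? content ".").getD [])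
    (h : PySem.Str.isIn p (PySem.Str.lower s) = true) :
    PySem.Str.isIn p (PySem.Str.lower content) = true := by
  have hinf : s.toList <:+: content.toList := pv_mem_split_infix content s hs
  rw [PySem.Str.isIn_iff_infix] at h ⊢
  rw [PySem.Str.toList_lower] at h ⊢
  simp only [PySem.Chars.lower] at h ⊢
  exact h.trans (hinf.map _)

-- inner fold over the pattern list: effect on one key
lemma pv_inner_fold (low st : String) :
    ∀ (ps : List String) (d : PySem.Dict String String) (p : String),
      (ps.foldl (fun d q =>
          if PySem.Str.isIn q low && (d.get? q).isNone then d.insert q st else d) d).get? p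
        = if p ∈ ps ∧ PySem.Str.isIn p low = true ∧ d.get? p = none then some st
          else d.get? p := by
  intro ps
  induction ps with
  | nil => intro d p; simp
  | cons q ps ih =>
    intro d p
    simp only [List.foldl_cons]
    rw [ih]
    by_cases hpq : p = q
    · subst hpq
      by_cases hlow : PySem.Str.isIn p low = true
      · by_cases hd : d.get? p = none
        · have h1 : (PySem.Str.isIn p low && (d.get? p).isNone) = true := by
            rw [hlow, hd]; rfl
          rw [if_pos h1, PySem.Dict.get?_insert_self]
          have hB : p ∈ p :: ps ∧ PySem.Str.isIn p low = true ∧ d.get? p = none :=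
            ⟨by simp, hlow, hd⟩
          rw [if_pos hB]
          split <;> rfl
        · have h1 : (PySem.Str.isIn p low && (d.get? p).isNone) = false := by
            obtain ⟨v, hv⟩ := Option.ne_none_iff_exists'.mp hd
            rw [hv]; simp
          rw [h1]
          simp only [Bool.false_eq_true, if_false]
          have hnc : ¬(p ∈ ps ∧ PySem.Str.isIn p low = true ∧ d.get? p = none) :=
            fun h => hd h.2.2
          have hnc2 : ¬(p ∈ p :: ps ∧ PySem.Str.isIn p low = true ∧ d.get? p = none) :=
            fun h => hd h.2.2
          rw [if_neg hnc, if_neg hnc2]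
      · have hlow' : PySem.Str.isIn p low = false := Bool.eq_false_iff.mpr hlow
        have h1 : (PySem.Str.isIn p low && (d.get? p).isNone) = false := by
          rw [hlow']; rfl
        rw [h1]
        simp only [Bool.false_eq_true, if_false]
        have hnc : ¬(p ∈ ps ∧ PySem.Str.isIn p low = true ∧ d.get? p = none) :=
          fun h => hlow h.2.1
        have hnc2 : ¬(p ∈ p :: ps ∧ PySem.Str.isIn p low = true ∧ d.get? p = none) :=
          fun h => hlow h.2.1
        rw [if_neg hnc, if_neg hnc2]
    · have hget : (if (PySem.Str.isIn q low && (d.get? q).isNone) = true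
          then d.insert q st else d).get? p = d.get? p := by
        split
        · exact PySem.Dict.get?_insert_of_ne d st hpq
        · rfl
      rw [hget]
      simp only [show (p ∈ q :: ps) ↔ p ∈ ps from by simp [hpq]]

-- outer fold over the sentences: the dict records the first qualifying sentence per pattern
lemma pv_outer_fold :
    ∀ (sentences : List String) (d : PySem.Dict String String) (p : String),
      p ∈ pvKeyPatterns →
      ((sentences.foldl (fun (d : PySem.Dict String String) sentence =>
          let stripped := PySem.Str.strip sentence
          if 20 < PySem.Str.len stripped then
            let low := PySem.Str.lower sentence
            pvKeyPatterns.foldl (fun d pattern =>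
              if PySem.Str.isIn pattern low && (d.get? pattern).isNone then
                d.insert pattern stripped
              else d) d
          else d) d).get? p)
        = (d.get? p).or ((sentences.find? (pvPred p)).map PySem.Str.strip) := by
  intro sentences
  induction sentences with
  | nil => intro d p hp; simp
  | cons s rest ih =>
    intro d p hp
    simp only [List.foldl_cons]
    by_cases h20 : 20 < PySem.Str.len (PySem.Str.strip s)
    · simp only [h20, if_true]
      rw [ih _ p hp, pv_inner_fold]
      by_cases hin : PySem.Str.isIn p (PySem.Str.lower s) = true
      · have hpred : pvPred p s = true := by
          unfold pvPred; rw [hin, Bool.true_and, decide_eq_true_eq]; exact h20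
        rw [List.find?_cons_of_pos hpred]
        by_cases hd : d.get? p = none
        · rw [if_pos ⟨hp, hin, hd⟩, hd]
          simp
        · obtain ⟨v, hv⟩ := Option.ne_none_iff_exists'.mp hd
          rw [if_neg (fun h => hd h.2.2), hv]
          simp
      · have hin' : PySem.Str.isIn p (PySem.Str.lower s) = false := Bool.eq_false_iff.mpr hin
        have hpred : pvPred p s = false := by unfold pvPred; rw [hin', Bool.false_and]
        rw [List.find?_cons_of_neg (by rw [hpred]; exact Bool.false_ne_true)]
        rw [if_neg (fun h => hin h.2.1)]
    · simp only [h20, if_false]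
      rw [ih _ p hp]
      have hpred : pvPred p s = false := by
        unfold pvPred; rw [decide_eq_false h20, Bool.and_false]
      rw [List.find?_cons_of_neg (by rw [hpred]; exact Bool.false_ne_true)]

-- A's accumulator fold equals the filterMap over the first-match results
lemma pv_foldA_filterMap (content : String) :
    ∀ (ps : List String) (acc : List String),
      (ps.foldl (fun acc pattern =>
        if PySem.Str.isIn pattern (PySem.Str.lower content) then
          let sentences := (PySem.Str.split? content ".").getD []
          match sentences.find? (fun sentence =>
              PySem.Str.isIn pattern (PySem.Str.lower sentence) &&
                20 < PySem.Str.len (PySem.Str.strip sentence)) with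
          | some sentence => acc ++ [PySem.Str.strip sentence]
          | none => acc
        else acc) acc)
      = acc ++ ps.filterMap (fun p =>
          ((((PySem.Str.split? content ".").getD []).find? (pvPred p)).map PySem.Str.strip)) := by
  intro ps
  induction ps with
  | nil => intro acc; simp
  | cons p ps ih =>
    intro acc
    simp only [List.foldl_cons, List.filterMap_cons]
    have hEq : (fun sentence => PySem.Str.isIn p (PySem.Str.lower sentence) &&
        decide (20 < PySem.Str.len (PySem.Str.strip sentence))) = pvPred p := rfl
    by_cases hc : PySem.Str.isIn p (PySem.Str.lower content) = true
    · simp only [hc, if_true]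
      cases hfind : List.find? (pvPred p) ((PySem.Str.split? content ".").getD []) with
      | none =>
        rw [hEq, hfind]
        exact ih acc
      | some s =>
        rw [hEq, hfind, ih]
        simp
    · have hc' : PySem.Str.isIn p (PySem.Str.lower content) = false := Bool.eq_false_iff.mpr hc
      simp only [hc', Bool.false_eq_true, if_false]
      cases hfind : List.find? (pvPred p) ((PySem.Str.split? content ".").getD []) with
      | none =>
        exact ih acc
      | some s =>
        exfalso
        have hmem : s ∈ ((PySem.Str.split? content ".").getD []) := List.mem_of_find?_eq_some hfind
        have hpred : pvPred p s = true := List.find?_some hfind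
        have hin : PySem.Str.isIn p (PySem.Str.lower s) = true := by
          by_contra hne
          have hf : PySem.Str.isIn p (PySem.Str.lower s) = false := Bool.eq_false_iff.mpr hne
          unfold pvPred at hpred
          rw [hf, Bool.false_and] at hpred
          exact Bool.false_ne_true hpred
        exact hc (pv_isIn_content content p s hmem hin)

-- the two found_key_points lists coincide
lemma pv_found_eq (content : String) :
    (pvKeyPatterns.foldl (fun acc pattern =>
      if PySem.Str.isIn pattern (PySem.Str.lower content) then
        let sentences := (PySem.Str.split? content ".").getD []
        match sentences.find? (fun sentence =>
            PySem.Str.isIn pattern (PySem.Str.lower sentence) &&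
              20 < PySem.Str.len (PySem.Str.strip sentence)) with
        | some sentence => acc ++ [PySem.Str.strip sentence]
        | none => acc
      else acc) [])
    = pvKeyPatterns.filterMap (fun p =>
        ((((PySem.Str.split? content ".").getD []).foldl
          (fun (d : PySem.Dict String String) sentence =>
            let stripped := PySem.Str.strip sentence
            if 20 < PySem.Str.len stripped then
              let low := PySem.Str.lower sentence
              pvKeyPatterns.foldl (fun d pattern =>
                if PySem.Str.isIn pattern low && (d.get? pattern).isNone then
                  d.insert pattern stripped
                else d) d
            else d) PySem.Dict.empty).get? p)) := by
  rw [pv_foldA_filterMap content pvKeyPatterns []]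
  rw [List.nil_append]
  apply List.filterMap_congr
  intro p hp
  rw [pv_outer_fold _ PySem.Dict.empty p hp]
  simp

-- ===== VERDICT (by name: the statement is the Claim_ definition above) =====
theorem summarize_profile_content_py_spec : Claim_equal_summarize_profile_content_py := by
  intro content _
  unfold Spec_summarize_profile_content_py
  unfold summarize_profile_content_py summarize_profile_content_py_alt
  by_cases h : (content == "" || PySem.Str.len content < 50) = true
  · simp only [h, if_true]
  · simp only [h]
    rw [pv_found_eq content]
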